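-- pv_equiv track=rewrite | github.com/pypi-data/pypi-mirror-330 | packages/DHdlk/dhdlk-0.1.20.tar.gz/dhdlk-0.1.20/xyntwoger/xy_n_equals.py | transform_string_keep_y
-- ===== SOURCE A (Python) =====
-- def transform_string_keep_y(term):
--     if len(term) <= 0:
--         return term
--     result = []
--     current_char = term[0]
--     current_char_count = 1
--
--     def append_result(char, count):
--         if char == 'x':
--             result.append(f"x^{count} " if count > 1 else 'x')
--         elif char == 'y':
--             result.append(f"y^{count} " if count > 1 else 'y')
--         else:
--             result.append(char)
--
--     for i in range(1, len(term)):
--         if term[i] == current_char: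
--             current_char_count += 1
--         else:
--             append_result(current_char, current_char_count)
--             current_char = term[i]
--             current_char_count = 1
--
--     append_result(current_char, current_char_count)
--     return ''.join(result)
-- ===== SOURCE B (Python) =====
-- def transform_string_keep_y(term):
--     n = len(term)
--     # Pass 1: indices where a new run begins.
--     starts = [i for i in range(n) if i == 0 or term[i] != term[i - 1]]
--     # Pass 2: pair each run start with the next boundary and emit its piece.
--     pieces = []
--     for s, e in zip(starts, starts[1:] + [n]):
--         c = term[s]
--         pieces.append(f"{c}^{e - s} " if c in "xy" and e - s > 1 else c)
--     return "".join(pieces)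
-- ===== Notes on version B (the rewrite author's own statement) =====
-- stated objective: alternative
-- what changed: Replaced A's single-pass state machine carrying (current_char, count) with two staged passes: first build the list of run-start indices by index comparison, then zip consecutive boundaries and emit each piece from the boundary arithmetic.
import Mathlib
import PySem

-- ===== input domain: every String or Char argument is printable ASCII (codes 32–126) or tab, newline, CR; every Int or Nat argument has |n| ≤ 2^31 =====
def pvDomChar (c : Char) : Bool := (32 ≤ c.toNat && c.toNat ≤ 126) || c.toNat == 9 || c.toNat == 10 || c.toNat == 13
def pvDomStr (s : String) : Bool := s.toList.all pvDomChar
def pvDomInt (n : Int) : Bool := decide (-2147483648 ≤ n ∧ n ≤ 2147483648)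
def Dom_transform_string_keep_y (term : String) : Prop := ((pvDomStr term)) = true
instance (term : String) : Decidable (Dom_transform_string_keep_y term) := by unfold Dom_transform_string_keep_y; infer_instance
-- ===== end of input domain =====

-- B replaces A's single-pass state machine with two staged passes: a run-start
-- index list, then boundary arithmetic over zipped consecutive boundaries
-- (alternative decomposition, same O(n) cost; return value only).

-- ===== PORT A =====
def pvAppendResult (c : Char) (count : Int) : String :=
  if c = 'x' then (if count > 1 then "x^" ++ PySem.Int.toStr count ++ " " else "x")
  else if c = 'y' then (if count > 1 then "y^" ++ PySem.Int.toStr count ++ " " else "y")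
  else String.ofList [c]

def transform_string_keep_y (term : String) : String :=
  match term.toList with
  | [] => term
  | c0 :: rest =>
    let st := rest.foldl
      (fun (st : List String × Char × Int) ci =>
        if ci = st.2.1 then (st.1, st.2.1, st.2.2 + 1)
        else (st.1 ++ [pvAppendResult st.2.1 st.2.2], ci, 1))
      ([], c0, 1)
    String.join (st.1 ++ [pvAppendResult st.2.1 st.2.2])

-- ===== PORT B =====
-- the conditional f-string append of Source B, as a named helper
def pvPiece (c : Char) (count : Int) : String :=
  if (c = 'x' ∨ c = 'y') ∧ count > 1 then String.ofList [c] ++ "^" ++ PySem.Int.toStr count ++ " "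
  else String.ofList [c]

-- pass 1 of Source B: [i for i in range(n) if i == 0 or term[i] != term[i-1]]
def pvStarts (l : List Char) : List Nat :=
  (List.range l.length).filter (fun i => i == 0 || !(l.getD i ' ' == l.getD (i - 1) ' '))

def transform_string_keep_y_alt (term : String) : String :=
  let l := term.toList
  let starts := pvStarts l
  let ends := starts.tail ++ [l.length]
  String.join ((starts.zip ends).map
    (fun se => pvPiece (l.getD se.1 ' ') ((se.2 : Int) - (se.1 : Int))))

-- ===== PRECONDITION & SPEC =====
def Spec_transform_string_keep_y (term : String) (out : String) : Prop := out = transform_string_keep_y_alt term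
instance (term : String) (out : String) : Decidable (Spec_transform_string_keep_y term out) := by unfold Spec_transform_string_keep_y; infer_instance

-- ===== CLAIM (what is proved, stated in full; the proofs are below) =====
def Claim_equal_transform_string_keep_y : Prop := ∀ (term : String), Dom_transform_string_keep_y term → Spec_transform_string_keep_y term (transform_string_keep_y term)

-- ===== LEMMAS AND PROOFS =====

-- run-length normal form both sides are reduced to (proof-only helper)
def pvScan : List Char → String
  | [] => ""
  | c :: rest =>
    pvPiece c (1 + ((rest.takeWhile (· = c)).length : Int)) ++ pvScan (rest.dropWhile (· = c))
termination_by l => l.length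
decreasing_by simpa using Nat.lt_succ_of_le (List.length_dropWhile_le _ _)

theorem pv_append_eq_piece (c : Char) (n : Int) : pvAppendResult c n = pvPiece c n := by
  unfold pvAppendResult pvPiece
  by_cases hx : c = 'x' <;> by_cases hy : c = 'y' <;> by_cases hn : n > 1 <;> simp_all

theorem pv_join_append_singleton (l : List String) (s : String) :
    String.join (l ++ [s]) = String.join l ++ s := by
  induction l with
  | nil => simp [String.join]
  | cons a t ih => simp [String.join, List.foldl_append] at *

-- A's pending-run finisher, as structural recursion (proof-only helper)
def pvRun (cc : Char) (cnt : Int) : List Char → String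
  | [] => pvPiece cc cnt
  | c :: rest => if c = cc then pvRun cc (cnt + 1) rest else pvPiece cc cnt ++ pvRun c 1 rest

theorem pv_run_eq_scan : ∀ (l : List Char) (cc : Char) (cnt : Int),
    pvRun cc cnt l =
      pvPiece cc (cnt + ((l.takeWhile (· = cc)).length : Int)) ++ pvScan (l.dropWhile (· = cc)) := by
  intro l
  induction l with
  | nil => intro cc cnt; simp [pvRun, pvScan]
  | cons c rest ih =>
    intro cc cnt
    by_cases h : c = cc
    · subst h
      rw [pvRun, if_pos rfl, ih]
      have harg : cnt + 1 + ((rest.takeWhile (· = c)).length : Int)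
          = cnt + (((c :: rest).takeWhile (· = c)).length : Int) := by
        simp; ring
      rw [harg]
      simp
    · rw [pvRun, if_neg h, ih]
      have ht : (c :: rest).takeWhile (· = cc) = [] := by simp [h]
      have hd : (c :: rest).dropWhile (· = cc) = c :: rest := by simp [h]
      rw [ht, hd, pvScan]
      simp

theorem pv_fold_eq : ∀ (l : List Char) (res : List String) (cc : Char) (cnt : Int),
    (let st := l.foldl
        (fun (st : List String × Char × Int) ci =>
          if ci = st.2.1 then (st.1, st.2.1, st.2.2 + 1)
          else (st.1 ++ [pvAppendResult st.2.1 st.2.2], ci, 1))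
        (res, cc, cnt)
     String.join (st.1 ++ [pvAppendResult st.2.1 st.2.2]))
      = String.join res ++ pvRun cc cnt l := by
  intro l
  induction l with
  | nil =>
    intro res cc cnt
    simp [pvRun, pv_join_append_singleton, pv_append_eq_piece]
  | cons c rest ih =>
    intro res cc cnt
    by_cases h : c = cc
    · simp only [List.foldl_cons, if_pos h]
      rw [ih]
      simp [pvRun, h]
    · simp only [List.foldl_cons, if_neg h]
      rw [ih, pv_join_append_singleton]
      simp [pvRun, h, pv_append_eq_piece, String.append_assoc]

-- ---- B side: characterising pvStarts ----

-- run starts of t, relative to a previous character p (proof-only)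
def pvRStarts : Char → List Char → List Nat
  | _, [] => []
  | p, a :: t => (if a = p then [] else [0]) ++ (pvRStarts a t).map (· + 1)

-- boundary predicate of pass 1, shifted by one, with explicit previous char
def pvG (p : Char) (t : List Char) (i : Nat) : Bool :=
  !(t.getD i ' ' == (if i == 0 then p else t.getD (i - 1) ' '))

theorem pv_filter_g : ∀ (t : List Char) (p : Char),
    (List.range t.length).filter (pvG p t) = pvRStarts p t := by
  intro t
  induction t with
  | nil => intro p; simp [pvRStarts]
  | cons a t ih =>
    intro p
    have hr : List.range (a :: t).length = 0 :: (List.range t.length).map (· + 1) := by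
      simp [List.range_succ_eq_map]
    have hshift : ∀ i, pvG p (a :: t) (i + 1) = pvG a t i := by
      intro i
      cases i with
      | zero => simp [pvG]
      | succ n => simp [pvG]
    rw [hr]
    by_cases h : a = p
    · have h0 : pvG p (a :: t) 0 = false := by simp [pvG, h]
      simp only [List.filter_cons, h0, List.filter_map]
      rw [show ((pvG p (a :: t)) ∘ (· + 1)) = pvG a t from funext hshift, ih]
      simp [pvRStarts, h]
    · have h0 : pvG p (a :: t) 0 = true := by simp [pvG, h]
      simp only [List.filter_cons, h0, List.filter_map]
      rw [show ((pvG p (a :: t)) ∘ (· + 1)) = pvG a t from funext hshift, ih]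
      simp [pvRStarts, h]

theorem pv_starts_cons (c : Char) (rest : List Char) :
    pvStarts (c :: rest) = 0 :: (pvRStarts c rest).map (· + 1) := by
  unfold pvStarts
  have hr : List.range (c :: rest).length = 0 :: (List.range rest.length).map (· + 1) := by
    simp [List.range_succ_eq_map]
  rw [hr]
  have hpred0 : ((0 : Nat) == 0 || !((c :: rest).getD 0 ' ' == (c :: rest).getD (0 - 1) ' ')) = true := by
    simp
  have hshift : ∀ i, ((i + 1 : Nat) == 0 || !((c :: rest).getD (i + 1) ' ' == (c :: rest).getD (i + 1 - 1) ' ')) = pvG c rest i := by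
    intro i
    cases i with
    | zero => simp [pvG]
    | succ n => simp [pvG]
  simp only [List.filter_cons, hpred0, List.filter_map, if_true]
  rw [show ((fun i => (i == 0 || !((c :: rest).getD i ' ' == (c :: rest).getD (i - 1) ' '))) ∘ (· + 1))
        = pvG c rest from funext hshift, pv_filter_g]

-- a maximal run of c at the front contributes no relative starts, only a shift
theorem pv_rstarts_drop : ∀ (rest : List Char) (c : Char),
    pvRStarts c rest
      = (pvRStarts c (rest.dropWhile (· = c))).map (· + (rest.takeWhile (· = c)).length) := by
  intro rest
  induction rest with
  | nil => intro c; simp [pvRStarts]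
  | cons a t ih =>
    intro c
    by_cases h : a = c
    · subst h
      have hh : pvRStarts a (a :: t) = (pvRStarts a t).map (· + 1) := by simp [pvRStarts]
      rw [hh, ih a]
      simp [List.map_map, Nat.add_comm]
    · have ht : (a :: t).takeWhile (· = c) = [] := by simp [h]
      have hd : (a :: t).dropWhile (· = c) = a :: t := by simp [h]
      rw [ht, hd]
      simp

-- pvRStarts with previous char c on a list not starting with c is pvStarts
theorem pv_rstarts_eq_starts (c : Char) (l : List Char) (h : ∀ a t, l = a :: t → a ≠ c) :
    pvRStarts c l = pvStarts l := by
  cases l with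
  | nil => simp [pvRStarts, pvStarts]
  | cons a t =>
    have ha : a ≠ c := h a t rfl
    rw [pv_starts_cons a t]
    simp [pvRStarts, ha]

theorem pv_starts_run (c : Char) (rest : List Char) :
    pvStarts (c :: rest)
      = 0 :: (pvStarts (rest.dropWhile (· = c))).map
          (· + (1 + (rest.takeWhile (· = c)).length)) := by
  rw [pv_starts_cons, pv_rstarts_drop rest c,
      pv_rstarts_eq_starts c (rest.dropWhile (· = c)) ?_]
  · simp [List.map_map, Nat.add_comm]
  · intro a t hat hac
    have hne : rest.dropWhile (· = c) ≠ [] := by simp [hat]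
    have hhead := List.head_dropWhile_not (p := fun x => decide (x = c)) (l := rest) hne
    have h2 : (rest.dropWhile (· = c)).head? = some a := by rw [hat]; rfl
    have h3 : (rest.dropWhile (· = c)).head? = some ((rest.dropWhile (· = c)).head hne) :=
      List.head?_eq_some_head hne
    have h4 : (rest.dropWhile (· = c)).head hne = a := by
      rw [h3] at h2; exact Option.some.inj h2
    rw [h4] at hhead
    simp [hac] at hhead

-- pvStarts of a nonempty list is nonempty with head 0
theorem pv_starts_shape (l : List Char) (h : l ≠ []) : ∃ T, pvStarts l = 0 :: T := by
  cases l with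
  | nil => exact absurd rfl h
  | cons a t => exact ⟨_, pv_starts_cons a t⟩

-- the B expression, as a function of the char list
def pvAltExpr (l : List Char) : String :=
  String.join (((pvStarts l).zip ((pvStarts l).tail ++ [l.length])).map
    (fun se => pvPiece (l.getD se.1 ' ') ((se.2 : Int) - (se.1 : Int))))

theorem pv_alt_eq_scan : ∀ l : List Char, pvAltExpr l = pvScan l := by
  intro l
  induction l using pvScan.induct with
  | case1 => simp [pvAltExpr, pvStarts, pvScan, String.join]
  | case2 c rest ih =>
    rw [pvScan]
    unfold pvAltExpr
    rw [pv_starts_run c rest]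
    unfold pvAltExpr at ih
    set t1 := rest.takeWhile (· = c) with ht1
    set t2 := rest.dropWhile (· = c) with ht2
    have happ : t1 ++ t2 = rest := List.takeWhile_append_dropWhile
    have hlapp := congrArg List.length happ
    rw [List.length_append] at hlapp
    have hlen : (c :: rest).length = t2.length + (1 + t1.length) := by
      simp only [List.length_cons]
      omega
    have hdrop : (c :: rest).drop (1 + t1.length) = t2 := by
      rw [Nat.add_comm, List.drop_succ_cons, ← happ, List.drop_left]
    have hget : ∀ s : Nat, (c :: rest).getD (s + (1 + t1.length)) ' ' = t2.getD s ' ' := by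
      intro s
      simp only [List.getD]
      conv_rhs => rw [← hdrop]
      rw [List.getElem?_drop, Nat.add_comm]
    by_cases hre : t2 = []
    · have hS : pvStarts t2 = [] := by rw [hre]; simp [pvStarts]
      have hlen0 : (c :: rest).length = 1 + t1.length := by rw [hre] at hlen; simpa using hlen
      rw [hS, hre, pvScan]
      simp [String.join, hlen0]
    · obtain ⟨T, hT⟩ := pv_starts_shape t2 hre
      rw [hT] at ih ⊢
      have e1 : ((0 :: T).map (· + (1 + t1.length))) ++ [(c :: rest).length]
          = ((0 :: (T ++ [t2.length])).map (· + (1 + t1.length))) := by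
        simp [hlen]
      simp only [List.tail_cons]
      rw [e1]
      simp only [List.map_cons, Nat.zero_add, List.zip_cons_cons, List.map_cons]
      rw [show ((1 + t1.length) :: T.map (· + (1 + t1.length)))
            = (0 :: T).map (· + (1 + t1.length)) from by simp]
      rw [show ((0 :: T).map (· + (1 + t1.length))).zip ((T ++ [t2.length]).map (· + (1 + t1.length)))
            = ((0 :: T).zip (T ++ [t2.length])).map
                (Prod.map (· + (1 + t1.length)) (· + (1 + t1.length))) from List.zip_map ..,
          List.map_map]
      have hpieces : ((fun se : Nat × Nat =>
              pvPiece ((c :: rest).getD se.1 ' ') ((se.2 : Int) - (se.1 : Int)))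
            ∘ (Prod.map (· + (1 + t1.length)) (· + (1 + t1.length))))
          = (fun se : Nat × Nat => pvPiece (t2.getD se.1 ' ') ((se.2 : Int) - (se.1 : Int))) := by
        funext se
        simp only [Function.comp, Prod.map]
        rw [hget se.1]
        congr 1
        push_cast
        ring
      rw [hpieces]
      have hfold : ∀ (l : List String) (s : String),
          List.foldl (· ++ ·) s l = s ++ List.foldl (· ++ ·) "" l := by
        intro l
        induction l with
        | nil => intro s; simp
        | cons a t ihf =>
          intro s
          simp only [List.foldl_cons]
          rw [ihf (s ++ a), ihf ("" ++ a)]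
          simp [String.append_assoc]
      have hjoin : ∀ (s : String) (l : List String), String.join (s :: l) = s ++ String.join l := by
        intro s l
        simp only [String.join, List.foldl_cons]
        rw [hfold l ("" ++ s)]
        simp
      rw [hjoin]
      simp only [List.tail_cons] at ih
      rw [ih]
      have hcast : ((1 + t1.length : Nat) : Int) - ((0 : Nat) : Int) = 1 + (t1.length : Int) := by
        push_cast; ring
      rw [show ((c :: rest).getD 0 ' ') = c from rfl, hcast]

-- ===== VERDICT (by name: the statement is the Claim_ definition above) =====
theorem transform_string_keep_y_spec : Claim_equal_transform_string_keep_y := by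
  intro term _
  show transform_string_keep_y term = transform_string_keep_y_alt term
  have hBdef : transform_string_keep_y_alt term = pvAltExpr term.toList := rfl
  cases h : term.toList with
  | nil =>
    have he : term = "" := String.toList_eq_nil_iff.mp h
    subst he
    rfl
  | cons c0 rest =>
    have hA : transform_string_keep_y term = pvScan (c0 :: rest) := by
      unfold transform_string_keep_y
      rw [h]
      refine Eq.trans (pv_fold_eq rest [] c0 1) ?_
      rw [pv_run_eq_scan, pvScan]
      simp [String.join]
    rw [hBdef, h, pv_alt_eq_scan, hA]
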